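-- pv_equiv track=rewrite | github.com/OrezriceWasHere/ner_retriever | fewnerd_dataset/dataset.py | split_into_document
-- ===== SOURCE A (Python) =====
-- def split_into_document(file_content):
--     """
--     Splits the dataset file content into documents.
--     Each document is a list of non-empty lines.
--     Documents are separated by empty lines.
--     """
--     documents = []
--     current_doc = []
--     for line in file_content.splitlines():
--         if line.strip() == "":
--             if current_doc:
--                 documents.append(current_doc)
--                 current_doc = []
--         else:
--             current_doc.append(line.strip())
--     if current_doc:
--         documents.append(current_doc)
--     return documents
-- ===== SOURCE B (Python) =====
-- def split_into_document(file_content):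
--     """Run-based scanner: skip runs of blank lines, emit each maximal run of
--     non-blank lines as one document (no current-document buffer / flush step)."""
--     lines = file_content.splitlines()
--     n = len(lines)
--     documents = []
--     i = 0
--     while i < n:
--         if lines[i].strip() == "":
--             i += 1
--         else:
--             j = i
--             while j < n and lines[j].strip() != "":
--                 j += 1
--             documents.append([line.strip() for line in lines[i:j]])
--             i = j
--     return documents
-- ===== Notes on version B (the rewrite author's own statement) =====
-- stated objective: alternative
-- what changed: Replaced A's buffer-and-flush accumulator loop by a run-based two-pointer scan that skips blank runs and emits each maximal non-blank run as a document in one step.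
import Mathlib
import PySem

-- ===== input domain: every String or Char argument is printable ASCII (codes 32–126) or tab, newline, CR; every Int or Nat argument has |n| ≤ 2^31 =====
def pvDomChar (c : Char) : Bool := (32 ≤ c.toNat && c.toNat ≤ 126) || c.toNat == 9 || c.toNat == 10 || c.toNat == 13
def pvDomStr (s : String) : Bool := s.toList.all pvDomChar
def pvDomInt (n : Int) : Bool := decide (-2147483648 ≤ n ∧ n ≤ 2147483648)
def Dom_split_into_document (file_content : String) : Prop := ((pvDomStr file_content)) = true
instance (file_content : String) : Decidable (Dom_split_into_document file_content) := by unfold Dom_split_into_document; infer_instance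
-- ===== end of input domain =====

-- B replaces A's buffer-and-flush accumulator loop by a run-based scan (skip blank runs,
-- emit each maximal non-blank run as a document); same O(n) cost, different decomposition.

-- ===== PORT A =====
-- loop body of A: state = (documents, current_doc)
def pvStepA (st : List (List String) × List String) (line : String) :
    List (List String) × List String :=
  if PySem.Str.strip line == "" then
    if st.2.isEmpty then st else (st.1 ++ [st.2], [])
  else (st.1, st.2 ++ [PySem.Str.strip line])

-- trailing 'if current_doc: documents.append(current_doc)'
def pvFinishA (st : List (List String) × List String) : List (List String) :=
  if st.2.isEmpty then st.1 else st.1 ++ [st.2]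

def split_into_document (file_content : String) : List (List String) :=
  pvFinishA ((PySem.Str.splitlines file_content).foldl pvStepA ([], []))

-- ===== PORT B =====
-- B's line is blank if line.strip() == ""
def pvBlank (line : String) : Bool := PySem.Str.strip line == ""

-- B's while-loop over the line list: skip a blank line, else take the maximal
-- non-blank run (inner 'while j < n and lines[j].strip() != ""') as one document.
def pvScanB (lines : List String) : List (List String) :=
  match lines with
  | [] => []
  | x :: xs =>
    if pvBlank x then pvScanB xs
    else
      ((x :: xs.takeWhile (fun l => !pvBlank l)).map PySem.Str.strip)
        :: pvScanB (xs.dropWhile (fun l => !pvBlank l))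
termination_by lines.length
decreasing_by
  · simp
  · exact Nat.lt_succ_of_le (List.length_dropWhile_le _ xs)

def split_into_document_alt (file_content : String) : List (List String) :=
  pvScanB (PySem.Str.splitlines file_content)

-- ===== PRECONDITION & SPEC =====
def Spec_split_into_document (file_content : String) (out : List (List String)) : Prop := out = split_into_document_alt file_content
instance (file_content : String) (out : List (List String)) : Decidable (Spec_split_into_document file_content out) := by unfold Spec_split_into_document; infer_instance

-- ===== CLAIM (what is proved, stated in full; the proofs are below) =====
def Claim_equal_split_into_document : Prop := ∀ (file_content : String), Dom_split_into_document file_content → Spec_split_into_document file_content (split_into_document file_content)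

-- ===== LEMMAS AND PROOFS =====

-- A's loop over a run of non-blank lines just extends current_doc with their strips.
lemma foldl_stepA_nonblank_run (run : List String) (h : ∀ l ∈ run, pvBlank l = false) :
    ∀ (rest : List String) (docs : List (List String)) (cur : List String),
      (run ++ rest).foldl pvStepA (docs, cur)
        = rest.foldl pvStepA (docs, cur ++ run.map PySem.Str.strip) := by
  induction run with
  | nil => intro rest docs cur; simp
  | cons x xs ih =>
    intro rest docs cur
    have hx : pvBlank x = false := h x (by simp)
    have hxs : ∀ l ∈ xs, pvBlank l = false := fun l hl => h l (by simp [hl])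
    simp only [List.cons_append, List.foldl_cons]
    rw [show pvStepA (docs, cur) x = (docs, cur ++ [PySem.Str.strip x]) by
      simp [pvStepA, pvBlank] at hx ⊢; simp [hx]]
    rw [ih hxs rest docs (cur ++ [PySem.Str.strip x])]
    simp

-- head of dropWhile fails the predicate
lemma head_dropWhile_blank (xs : List String) (y : String) (ys : List String)
    (h : xs.dropWhile (fun l => !pvBlank l) = y :: ys) : pvBlank y = true := by
  induction xs with
  | nil => simp at h
  | cons a as ih =>
    by_cases ha : pvBlank a
    · simp [ha] at h
      exact h.1 ▸ ha
    · simp [ha] at h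
      exact ih h

-- main invariant: running A's loop from (docs, []) and finishing equals docs ++ B's scan
lemma mainA (n : Nat) : ∀ (lines : List String), lines.length ≤ n →
    ∀ (docs : List (List String)),
      pvFinishA (lines.foldl pvStepA (docs, [])) = docs ++ pvScanB lines := by
  induction n with
  | zero =>
    intro lines hl docs
    have : lines = [] := List.eq_nil_of_length_eq_zero (Nat.le_zero.mp hl)
    subst this; simp [pvFinishA, pvScanB]
  | succ n ih =>
    intro lines hl docs
    match lines with
    | [] => simp [pvFinishA, pvScanB]
    | x :: xs =>
      by_cases hx : pvBlank x
      · -- blank head: A's step leaves ([],docs) state unchanged; B skips it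
        have hstep : pvStepA (docs, []) x = (docs, []) := by
          simp [pvStepA, pvBlank] at hx ⊢; simp [hx]
        simp only [List.foldl_cons, hstep]
        rw [ih xs (Nat.le_of_succ_le_succ hl) docs]
        rw [pvScanB]; simp [hx]
      · -- non-blank head: A accumulates the run x :: takeWhile …; B emits it as one doc
        have hxr : xs = xs.takeWhile (fun l => !pvBlank l) ++ xs.dropWhile (fun l => !pvBlank l) :=
          (List.takeWhile_append_dropWhile).symm
        have hrunnb : ∀ l ∈ xs.takeWhile (fun l => !pvBlank l), pvBlank l = false := by
          intro l hl'
          simpa using List.mem_takeWhile_imp hl'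
        have hstep : pvStepA (docs, []) x = (docs, [PySem.Str.strip x]) := by
          simp [pvStepA, pvBlank] at hx ⊢; simp [hx]
        simp only [List.foldl_cons, hstep]
        rw [show xs.foldl pvStepA (docs, [PySem.Str.strip x])
              = (xs.takeWhile (fun l => !pvBlank l) ++ xs.dropWhile (fun l => !pvBlank l)).foldl
                  pvStepA (docs, [PySem.Str.strip x]) by rw [← hxr]]
        rw [foldl_stepA_nonblank_run _ hrunnb _ docs [PySem.Str.strip x]]
        have hcur : ([PySem.Str.strip x] ++ (xs.takeWhile (fun l => !pvBlank l)).map PySem.Str.strip)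
            = (x :: xs.takeWhile (fun l => !pvBlank l)).map PySem.Str.strip := by simp
        rw [hcur]
        rw [pvScanB]; simp only [hx]
        cases hr : xs.dropWhile (fun l => !pvBlank l) with
        | nil =>
          simp [pvFinishA, pvScanB]
        | cons y ys =>
          have hy : pvBlank y = true := head_dropWhile_blank xs y ys hr
          have hflush : pvStepA (docs, (x :: xs.takeWhile (fun l => !pvBlank l)).map PySem.Str.strip) y
              = (docs ++ [(x :: xs.takeWhile (fun l => !pvBlank l)).map PySem.Str.strip], []) := by
            simp [pvStepA, pvBlank] at hy ⊢; simp [hy]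
          simp only [List.foldl_cons, hflush]
          have hys : ys.length ≤ n := by
            have h1 := List.length_dropWhile_le (fun l => !pvBlank l) xs
            rw [hr] at h1; simp at h1
            have h2 : xs.length ≤ n := Nat.le_of_succ_le_succ hl
            omega
          rw [ih ys hys (docs ++ [(x :: xs.takeWhile (fun l => !pvBlank l)).map PySem.Str.strip])]
          rw [show pvScanB (y :: ys) = pvScanB ys by rw [pvScanB.eq_def]; simp [hy]]
          simp

-- ===== VERDICT (by name: the statement is the Claim_ definition above) =====
theorem split_into_document_spec : Claim_equal_split_into_document := by
  intro file_content _
  unfold Spec_split_into_document split_into_document split_into_document_alt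
  simpa using mainA (PySem.Str.splitlines file_content).length
    (PySem.Str.splitlines file_content) le_rfl []
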